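-- pv_equiv track=rewrite | github.com/hxx344/perp | strategies/hedge_coordinator.py | _normalize_symbol_label
-- ===== SOURCE A (Python) =====
-- from typing import Any, Awaitable, Callable, Deque, Dict, List, Mapping, Optional, Sequence, Tuple, cast
--
-- def _normalize_symbol_label(value: Any) -> str:
--     if value is None:
--         return ""
--     try:
--         text = str(value).strip().upper()
--     except Exception:
--         return ""
--     for token in ("/", "-", ":", "_", " "):
--         text = text.replace(token, "")
--     return text
-- ===== SOURCE B (Python) =====
-- def _normalize_symbol_label(value) -> str:
--     if value is None:
--         return ""
--     try:
--         text = str(value).strip().upper()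
--     except Exception:
--         return ""
--     seps = {'/', '-', ':', '_', ' '}
--     return ''.join(ch for ch in text if ch not in seps)
-- ===== Notes on version B (the rewrite author's own statement) =====
-- stated objective: idiomatic
-- what changed: Replaces five sequential whole-string .replace() scans with a single character-wise filtering pass against a set of separator characters.
import Mathlib
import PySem

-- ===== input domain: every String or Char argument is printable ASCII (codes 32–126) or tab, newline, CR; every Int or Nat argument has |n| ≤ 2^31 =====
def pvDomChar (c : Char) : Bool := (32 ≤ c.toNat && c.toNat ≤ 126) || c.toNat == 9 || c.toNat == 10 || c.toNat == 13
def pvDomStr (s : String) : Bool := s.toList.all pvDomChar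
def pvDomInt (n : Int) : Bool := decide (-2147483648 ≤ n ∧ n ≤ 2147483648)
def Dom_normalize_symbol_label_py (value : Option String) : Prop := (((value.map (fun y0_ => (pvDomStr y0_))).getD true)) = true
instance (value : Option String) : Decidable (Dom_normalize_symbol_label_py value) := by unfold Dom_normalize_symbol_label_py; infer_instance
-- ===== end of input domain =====

-- B replaces five sequential whole-string .replace() scans with one character-wise
-- filtering pass against a set of separator characters (objective: idiomatic).

-- ===== PORT A =====
def normalize_symbol_label_py (value : Option String) : String :=
  match value with
  | none => ""
  | some v =>
    let text := PySem.Str.upper (PySem.Str.strip v)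
    (["/", "-", ":", "_", " "] : List String).foldl
      (fun text token => PySem.Str.replace text token "") text

-- ===== PORT B =====
def normalize_symbol_label_py_alt (value : Option String) : String :=
  match value with
  | none => ""
  | some v =>
    let text := PySem.Str.upper (PySem.Str.strip v)
    String.ofList (text.toList.filter (fun ch => !(['/', '-', ':', '_', ' '].contains ch)))

-- ===== PRECONDITION & SPEC =====
def Spec_normalize_symbol_label_py (value : Option String) (out : String) : Prop := out = normalize_symbol_label_py_alt value
instance (value : Option String) (out : String) : Decidable (Spec_normalize_symbol_label_py value out) := by unfold Spec_normalize_symbol_label_py; infer_instance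

-- ===== CLAIM (what is proved, stated in full; the proofs are below) =====
def Claim_equal_normalize_symbol_label_py : Prop := ∀ (value : Option String), Dom_normalize_symbol_label_py value → Spec_normalize_symbol_label_py value (normalize_symbol_label_py value)

-- ===== LEMMAS AND PROOFS =====

theorem replace_go_single (c : Char) (l acc : List Char) :
    PySem.Chars.replace.go [c] [] l.length l acc = acc.reverse ++ l.filter (fun x => x != c) := by
  induction l generalizing acc with
  | nil => simp [PySem.Chars.replace.go]
  | cons h t ih =>
    rw [List.length_cons, PySem.Chars.replace.go]
    by_cases hc : h = c
    · subst hc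
      simp [List.isPrefixOf, ih]
    · have : [c].isPrefixOf (h :: t) = false := by
        simp [List.isPrefixOf]; exact fun e => hc e.symm
      simp [this, ih, hc]

theorem replace_single (c : Char) (l : List Char) :
    PySem.Chars.replace l [c] [] = l.filter (fun x => x != c) := by
  rw [PySem.Chars.replace]
  simpa using replace_go_single c l []

theorem str_replace_single (s : String) (c : Char) :
    (PySem.Str.replace s (String.ofList [c]) "").toList = s.toList.filter (fun x => x != c) := by
  simp [PySem.Str.replace, replace_single]

-- ===== VERDICT (by name: the statement is the Claim_ definition above) =====
theorem normalize_symbol_label_py_spec : Claim_equal_normalize_symbol_label_py := by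
  intro value _
  unfold Spec_normalize_symbol_label_py normalize_symbol_label_py normalize_symbol_label_py_alt
  cases value with
  | none => rfl
  | some v =>
    simp only [List.foldl]
    apply String.toList_injective
    have h1 : ("/" : String) = String.ofList ['/'] := rfl
    have h2 : ("-" : String) = String.ofList ['-'] := rfl
    have h3 : (":" : String) = String.ofList [':'] := rfl
    have h4 : ("_" : String) = String.ofList ['_'] := rfl
    have h5 : (" " : String) = String.ofList [' '] := rfl
    rw [h1, h2, h3, h4, h5]
    rw [str_replace_single, str_replace_single, str_replace_single, str_replace_single,
        str_replace_single]
    simp only [List.filter_filter, String.toList_ofList]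
    apply List.filter_congr
    intro x _
    simp only [List.contains_cons, List.contains_nil, Bool.or_false, Bool.not_or, bne]
    ac_rfl
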